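-- pv_equiv track=rewrite | github.com/mavleo96/optimal-polygon-triangulation | app.py | _build_arc
-- ===== SOURCE A (Python) =====
-- def _build_arc(a: int, b: int, n: int) -> list[int]:
--     arc, cur = [], a
--     while True:
--         arc.append(cur)
--         if cur == b:
--             break
--         cur = (cur + 1) % n
--     return arc
-- ===== SOURCE B (Python) =====
-- def _build_arc(a: int, b: int, n: int) -> list[int]:
--     if a == b:
--         return [a]
--     steps = (b - a) % n or n
--     return [a] + [(a + i) % n for i in range(1, steps + 1)]
-- ===== Notes on version B (the rewrite author's own statement) =====
-- stated objective: alternative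
-- what changed: B computes the arc length in closed form as (b - a) % n (or a full cycle of n when a and b coincide mod n) and generates the indices with a bounded range, instead of A's unbounded while-True walk; Pre_ excludes negative n with a != b, where A walks through Python's negative signed-mod residues and B's nonpositive step count yields only [a].
-- outside the precondition, e.g. on _build_arc(-1, -2, -3): A returns [-1, 0, -2], B returns [-1]
import Mathlib
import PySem

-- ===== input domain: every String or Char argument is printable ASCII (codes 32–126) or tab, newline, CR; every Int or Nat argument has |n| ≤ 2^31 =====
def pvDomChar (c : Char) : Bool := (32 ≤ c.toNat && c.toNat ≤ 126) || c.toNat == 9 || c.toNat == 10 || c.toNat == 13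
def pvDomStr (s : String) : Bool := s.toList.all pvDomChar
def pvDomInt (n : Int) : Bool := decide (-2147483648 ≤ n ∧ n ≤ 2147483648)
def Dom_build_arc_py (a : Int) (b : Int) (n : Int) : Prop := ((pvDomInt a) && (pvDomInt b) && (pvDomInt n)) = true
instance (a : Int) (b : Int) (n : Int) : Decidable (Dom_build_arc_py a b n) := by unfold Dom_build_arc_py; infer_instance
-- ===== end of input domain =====

-- B replaces A's sentinel-break search loop by a closed-form arc length and a bounded
-- range generation; alternative decomposition, no speed claim.

-- ===== PORT A =====
-- the `while True` loop of A: fuel makes it total; on every input of Pre_ the fuel suffices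
def arcLoopA (fuel : Nat) (cur b n : Int) : List Int :=
  match fuel with
  | 0 => []
  | Nat.succ f =>
    if cur = b then [cur]
    else cur :: arcLoopA f (PySem.Int.mod (cur + 1) n) b n

def build_arc_py (a : Int) (b : Int) (n : Int) : List Int :=
  arcLoopA (n.natAbs + 1) a b n

-- ===== PORT B =====
def build_arc_py_alt (a : Int) (b : Int) (n : Int) : List Int :=
  if a = b then [a]
  else
    let s0 := PySem.Int.mod (b - a) n
    let steps := if s0 = 0 then n else s0        -- (b - a) % n or n
    [a] ++ (PySem.List.pyRange 1 (steps + 1) 1).map (fun i => PySem.Int.mod (a + i) n)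

-- ===== PRECONDITION & SPEC =====
-- Pre_ excludes the inputs on which A does not return (n = 0 with a ≠ b raises
-- ZeroDivisionError; b outside the residue range of `% n` never breaks the loop) and
-- negative n with a ≠ b, where A returns a walk through Python's negative signed-mod
-- residues — an artefact of the signed modulus that B's nonpositive step count does not
-- reproduce (B returns just [a] there).
def Pre_build_arc_py (a : Int) (b : Int) (n : Int) : Prop :=
  a = b ∨ (0 < n ∧ 0 ≤ b ∧ b < n)
instance (a : Int) (b : Int) (n : Int) : Decidable (Pre_build_arc_py a b n) := by
  unfold Pre_build_arc_py; infer_instance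

def pvWitness_build_arc_py : Int × Int × Int := (5, 2, 3)

def Spec_build_arc_py (a : Int) (b : Int) (n : Int) (out : List Int) : Prop := out = build_arc_py_alt a b n
instance (a : Int) (b : Int) (n : Int) (out : List Int) : Decidable (Spec_build_arc_py a b n out) := by unfold Spec_build_arc_py; infer_instance

-- ===== CLAIM (what is proved, stated in full; the proofs are below) =====
def Claim_equal_build_arc_py : Prop := ∀ (a : Int) (b : Int) (n : Int), Dom_build_arc_py a b n → Pre_build_arc_py a b n → Spec_build_arc_py a b n (build_arc_py a b n)

-- ===== LEMMAS AND PROOFS =====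

-- a multiple of n that is smaller than |n| in absolute value is 0
lemma dvd_small_eq_zero (n x : Int) (h : n ∣ x) (hx : x.natAbs < n.natAbs) : x = 0 := by
  by_cases h0 : x = 0
  · exact h0
  · have := Nat.le_of_dvd (Int.natAbs_pos.mpr h0) (Int.natAbs_dvd_natAbs.mpr h)
    omega

-- n divides (x % n) - x  (Python mod)
lemma pymod_sub_self_dvd (n x : Int) : n ∣ PySem.Int.mod x n - x := by
  have h := PySem.Int.floordiv_mul_add_mod x n
  have e : PySem.Int.mod x n - x = -(PySem.Int.floordiv x n) * n := by ring_nf; omega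
  rw [e]; exact Dvd.intro_left _ rfl

-- Python's mod depends only on the residue class (0 < n)
lemma pymod_eq_pymod_of_dvd (n x y : Int) (hn : 0 < n) (h : n ∣ x - y) :
    PySem.Int.mod x n = PySem.Int.mod y n := by
  have hd : n ∣ PySem.Int.mod x n - PySem.Int.mod y n := by
    have e : PySem.Int.mod x n - PySem.Int.mod y n
        = (PySem.Int.mod x n - x) + (x - y) - (PySem.Int.mod y n - y) := by ring
    rw [e]
    exact dvd_sub (dvd_add (pymod_sub_self_dvd n x) h) (pymod_sub_self_dvd n y)
  have bx1 := PySem.Int.mod_nonneg x hn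
  have bx2 := PySem.Int.mod_lt x hn
  have by1 := PySem.Int.mod_nonneg y hn
  have by2 := PySem.Int.mod_lt y hn
  have := dvd_small_eq_zero n _ hd (by omega)
  omega

-- a value already in [0, n) equals the mod of anything congruent to it
lemma pymod_eq_of_range (n x y : Int) (h : n ∣ x - y)
    (h1 : 0 < n) (h2 : 0 ≤ y) (h3 : y < n) :
    PySem.Int.mod x n = y := by
  have hd : n ∣ PySem.Int.mod x n - y := by
    have e : PySem.Int.mod x n - y = (PySem.Int.mod x n - x) + (x - y) := by ring
    rw [e]; exact dvd_add (pymod_sub_self_dvd n x) h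
  have b1 := PySem.Int.mod_nonneg x h1
  have b2 := PySem.Int.mod_lt x h1
  have := dvd_small_eq_zero n _ hd (by omega)
  omega

-- A's loop, started at (a + j) % n, runs exactly to a + steps and produces the arc segment
lemma arcLoopA_run (a b n steps : Int)
    (hhit : PySem.Int.mod (a + steps) n = b) (hn : 0 < n) :
    ∀ (k : Nat) (j : Int), 1 ≤ j → j + k = steps →
      (∀ i, j ≤ i → i < steps → PySem.Int.mod (a + i) n ≠ b) →
      ∀ fuel, k + 1 ≤ fuel →
      arcLoopA fuel (PySem.Int.mod (a + j) n) b n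
        = (PySem.List.pyRange j (steps + 1) 1).map (fun i => PySem.Int.mod (a + i) n) := by
  intro k
  induction k with
  | zero =>
    intro j _ hj _ fuel hfuel
    obtain ⟨f, rfl⟩ : ∃ f, fuel = f + 1 := ⟨fuel - 1, by omega⟩
    have hjs : j = steps := by omega
    subst hjs
    rw [PySem.List.pyRange_one_singleton]
    simp [arcLoopA, hhit]
  | succ k ih =>
    intro j hj1 hjk hne fuel hfuel
    obtain ⟨f, rfl⟩ : ∃ f, fuel = f + 1 := ⟨fuel - 1, by omega⟩
    have hjlt : j < steps := by omega
    have hcur : PySem.Int.mod (a + j) n ≠ b := hne j le_rfl hjlt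
    have hstep : PySem.Int.mod (PySem.Int.mod (a + j) n + 1) n
        = PySem.Int.mod (a + (j + 1)) n := by
      apply pymod_eq_pymod_of_dvd n _ _ hn
      have e : PySem.Int.mod (a + j) n + 1 - (a + (j + 1))
          = PySem.Int.mod (a + j) n - (a + j) := by ring
      rw [e]; exact pymod_sub_self_dvd n (a + j)
    have hrange : PySem.List.pyRange j (steps + 1) 1
        = j :: PySem.List.pyRange (j + 1) (steps + 1) 1 :=
      PySem.List.pyRange_one_cons (by omega)
    rw [hrange]
    simp only [List.map_cons, arcLoopA, if_neg hcur, hstep]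
    congr 1
    exact ih (j + 1) (by omega) (by omega) (fun i hi hi' => hne i (by omega) hi') f (by omega)

-- ===== VERDICT (by name: the statement is the Claim_ definition above) =====
theorem build_arc_py_spec : Claim_equal_build_arc_py := by
  intro a b n _ hPre
  unfold Spec_build_arc_py
  by_cases hab : a = b
  · subst hab
    simp [build_arc_py, build_arc_py_alt, arcLoopA]
  · obtain ⟨hn0, hb0, hbn⟩ : 0 < n ∧ 0 ≤ b ∧ b < n := by
      rcases hPre with h | h
      · exact absurd h hab
      · exact h
    obtain ⟨s0, hs0⟩ : ∃ s, s = PySem.Int.mod (b - a) n := ⟨_, rfl⟩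
    obtain ⟨steps, hsteps⟩ : ∃ s : Int, s = if s0 = 0 then n else s0 := ⟨_, rfl⟩
    have hs0b1 := PySem.Int.mod_nonneg (b - a) hn0
    have hs0b2 := PySem.Int.mod_lt (b - a) hn0
    have hsb : 1 ≤ steps ∧ steps ≤ n := by
      rw [hsteps]; split_ifs <;> omega
    have hcong : n ∣ (b - a) - steps := by
      have h1 : n ∣ (b - a) - s0 := by
        have e : (b - a) - s0 = -(PySem.Int.mod (b - a) n - (b - a)) := by rw [hs0]; ring
        rw [e]; exact dvd_neg.mpr (pymod_sub_self_dvd n (b - a))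
      rw [hsteps]; split_ifs with h
      · have := dvd_sub h1 (dvd_refl n); simpa [h] using this
      · exact h1
    have hhit : PySem.Int.mod (a + steps) n = b := by
      apply pymod_eq_of_range n _ _ _ hn0 hb0 hbn
      have e : a + steps - b = -((b - a) - steps) := by ring
      rw [e]; exact dvd_neg.mpr hcong
    have hne : ∀ i, (1:Int) ≤ i → i < steps → PySem.Int.mod (a + i) n ≠ b := by
      intro i hi1 hi2 hcontra
      have h1 : n ∣ b - (a + i) := by
        have := pymod_sub_self_dvd n (a + i)
        rwa [hcontra] at this
      have hdm : n ∣ steps - i := by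
        have e4 : steps - i = (b - (a + i)) - ((b - a) - steps) := by ring
        rw [e4]; exact dvd_sub h1 hcong
      have := dvd_small_eq_zero n _ hdm (by omega)
      omega
    have hA : build_arc_py a b n
        = a :: arcLoopA n.natAbs (PySem.Int.mod (a + 1) n) b n := by
      simp [build_arc_py, arcLoopA, hab]
    have hk : (1 : Int) + ((steps - 1).toNat : Int) = steps := by omega
    have hrun := arcLoopA_run a b n steps hhit hn0 (steps - 1).toNat 1 le_rfl hk hne
        n.natAbs (by omega)
    rw [hA]
    simp only [build_arc_py_alt, if_neg hab, List.singleton_append]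
    rw [← hs0, ← hsteps, hrun]
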